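-- pv_equiv track=rewrite | github.com/apundhir/license-compliance-checker | src/lcc/detection/javascript.py | _parse_legacy_yarn_lock
-- ===== SOURCE A (Python) =====
-- from collections.abc import Iterable, MutableMapping, Sequence
--
-- DependencySpec = tuple[str, str | None, dict[str, object]]
--
-- def _parse_legacy_yarn_lock(content: str) -> Iterable[DependencySpec]:
--     results: list[DependencySpec] = []
--     current_names: list[str] = []
--     metadata: dict[str, object] = {}
--     version: str | None = None
--     for line in content.splitlines():
--         if not line.strip():
--             if current_names:
--                 for entry in current_names:
--                     clean_name = entry.split("@", 1)[0].strip('"')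
--                     results.append((clean_name, version, metadata.copy()))
--             current_names = []
--             metadata = {}
--             version = None
--             continue
--         if not line.startswith(" "):
--             current_names = [name.strip() for name in line.rstrip(":").split(",")]
--             metadata = {"source": "yarn.lock"}
--         else:
--             key, _, value = line.strip().partition(" ")
--             value = value.strip('"')
--             if key == "version":
--                 version = value
--             elif key == "resolved":
--                 metadata["resolved"] = value
--             elif key == "integrity":
--                 metadata["integrity"] = value
--     if current_names:
--         for entry in current_names:
--             clean_name = entry.split("@", 1)[0].strip('"')
--             entry_metadata = dict(metadata)
--             entry_metadata["source"] = "yarn.lock"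
--             results.append((clean_name, version, entry_metadata))
--     return results
-- ===== SOURCE B (Python) =====
-- def _parse_legacy_yarn_lock(content):
--     results = []
--     # phase 1: group the lines into blocks of consecutive non-blank lines
--     blocks, cur = [], []
--     for line in content.splitlines():
--         if line.strip():
--             cur.append(line)
--         else:
--             if cur:
--                 blocks.append(cur)
--             cur = []
--     if cur:
--         blocks.append(cur)
--     # phase 2: each block yields one spec per name of its last header line
--     for block in blocks:
--         header, after = None, []
--         for line in block:
--             if line.startswith(" "):
--                 after.append(line)
--             else:
--                 header, after = line, []
--         if header is None:
--             continue
--         version = None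
--         meta = {"source": "yarn.lock"}
--         for line in after:
--             key, _, value = line.strip().partition(" ")
--             value = value.strip('"')
--             if key == "version":
--                 version = value
--             elif key in ("resolved", "integrity"):
--                 meta[key] = value
--         for entry in header.rstrip(":").split(","):
--             results.append((entry.strip().split("@", 1)[0].strip('"'), version, dict(meta)))
--     return results
-- ===== Notes on version B (the rewrite author's own statement) =====
-- stated objective: alternative
-- what changed: A's single pass with inline flushing and incrementally mutated names/metadata/version state is replaced by a two-phase decomposition: group the lines into blocks of consecutive non-blank lines, then for each block take the last non-indented header with its trailing indented lines and read version/resolved/integrity from those trailing lines only, emitting one spec per cleaned name.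
-- intended difference: On inputs where a block (run of non-blank lines) has an indented version line before its last non-indented header and no version line after it, A reports the stale version left over from before the header for the header's packages, while B reports None; resetting the version together with the names and metadata when a new header starts is the intended behaviour, the leak of the previous entry's version is accidental. — e.g. on _parse_legacy_yarn_lock("a:\n version \"1.0\"\nb:"): A returns [("b", some "1.0", [("source", "yarn.lock")])], B returns [("b", none, [("source", "yarn.lock")])]
import Mathlib
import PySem

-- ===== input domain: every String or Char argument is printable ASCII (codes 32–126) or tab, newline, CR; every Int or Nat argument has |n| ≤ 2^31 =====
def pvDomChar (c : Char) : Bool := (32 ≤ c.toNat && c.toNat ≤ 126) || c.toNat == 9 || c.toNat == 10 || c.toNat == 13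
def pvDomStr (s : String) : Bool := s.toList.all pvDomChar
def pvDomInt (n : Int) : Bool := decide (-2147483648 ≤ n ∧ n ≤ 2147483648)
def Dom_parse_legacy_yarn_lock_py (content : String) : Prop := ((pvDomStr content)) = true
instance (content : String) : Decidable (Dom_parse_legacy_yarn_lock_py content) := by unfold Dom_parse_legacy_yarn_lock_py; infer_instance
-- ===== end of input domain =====

-- B replaces A's single pass with inline flushing by a two-phase decomposition (group into
-- blocks of non-blank lines, then one per-block scan of the lines after the last header);
-- B resets the version on a new header where A leaks the previous header's version (see D_).

-- ===== shared line-level helpers (identical Python expressions in both sources) =====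

-- 'not line.strip()' : the line is whitespace-only
def pvBlank (l : String) : Bool := PySem.Str.strip l == ""

-- 'line.startswith(" ")'
def pvIndent (l : String) : Bool := PySem.Str.startswith l " "

-- 'line.rstrip(":")' : hand port (PySem has no rstrip-with-chars); exact: drops all trailing ':'
def pvRstripColon (l : String) : String := String.ofList ((l.toList.reverse.dropWhile (· == ':')).reverse)

-- '[name.strip() for name in line.rstrip(":").split(",")]'  (split? is some: "," ≠ "")
def pvHeaderNames (l : String) : List String :=
  ((PySem.Str.split? (pvRstripColon l) ",").getD []).map PySem.Str.strip

-- 'entry.split("@", 1)[0].strip('"')'  (split never returns []; [0] is its head)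
def pvClean (entry : String) : String :=
  PySem.Str.stripChars (((PySem.Str.splitMax? entry "@" 1).getD []).headD "") "\""

-- 'key, _, value = line.strip().partition(" "); value = value.strip('"')' : hand port of
-- str.partition(" ") (single-char separator): key = text before the first space, value = rest
def pvKV (l : String) : String × String :=
  let s := (PySem.Str.strip l).toList
  (String.ofList (s.takeWhile (· ≠ ' ')),
   PySem.Str.stripChars (String.ofList ((s.dropWhile (· ≠ ' ')).drop 1)) "\"")

-- ===== PORT A ===== (single pass; state = (results, current_names, metadata, version))

-- the non-blank part of A's loop body
def pvAStepLine (s : List String × PySem.Dict String String × Option String) (line : String) :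
    List String × PySem.Dict String String × Option String :=
  if ¬ pvIndent line then
    (pvHeaderNames line, PySem.Dict.ofList [("source", "yarn.lock")], s.2.2)
  else
    let kv := pvKV line
    if kv.1 == "version" then (s.1, s.2.1, some kv.2)
    else if kv.1 == "resolved" then (s.1, s.2.1.insert "resolved" kv.2, s.2.2)
    else if kv.1 == "integrity" then (s.1, s.2.1.insert "integrity" kv.2, s.2.2)
    else s

def pvAStep
    (st : List (String × Option String × List (String × String)) ×
          List String × PySem.Dict String String × Option String) (line : String) :
    List (String × Option String × List (String × String)) ×
      List String × PySem.Dict String String × Option String :=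
  if pvBlank line then
    (st.1 ++ st.2.1.map (fun e => (pvClean e, st.2.2.2, st.2.2.1.items)),
     [], PySem.Dict.empty, none)
  else
    (st.1, pvAStepLine st.2 line)

def parse_legacy_yarn_lock_py (content : String) :
    List (String × Option String × (List (String × String))) :=
  let st := (PySem.Str.splitlines content).foldl pvAStep ([], [], PySem.Dict.empty, none)
  -- final flush: entry_metadata = dict(metadata); entry_metadata["source"] = "yarn.lock"
  st.1 ++ st.2.1.map (fun e =>
    (pvClean e, st.2.2.2, ((st.2.2.1.insert "source" "yarn.lock").items)))

-- ===== PORT B ===== (phase 1: blocks of non-blank lines; phase 2: per-block emission)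

def pvBlocksStep (st : List (List String) × List String) (line : String) :
    List (List String) × List String :=
  if ¬ pvBlank line then (st.1, st.2 ++ [line])
  else (if st.2.isEmpty then st.1 else st.1 ++ [st.2], [])

-- scan for the last non-indented line (header) and the indented lines after it
def pvHarvestStep (st : Option String × List String) (line : String) : Option String × List String :=
  if pvIndent line then (st.1, st.2 ++ [line]) else (some line, [])

def pvHarvest (block : List String) : Option String × List String :=
  block.foldl pvHarvestStep (none, [])

-- B's loop over the trailing indented lines: state = (version, meta)
def pvBAfterStep (st : Option String × PySem.Dict String String) (line : String) :
    Option String × PySem.Dict String String :=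
  let kv := pvKV line
  if kv.1 == "version" then (some kv.2, st.2)
  else if (kv.1 == "resolved" || kv.1 == "integrity") then (st.1, st.2.insert kv.1 kv.2)
  else st

def pvEmitBlockB (block : List String) : List (String × Option String × List (String × String)) :=
  match pvHarvest block with
  | (none, _) => []
  | (some header, after) =>
      let vm := after.foldl pvBAfterStep (none, PySem.Dict.ofList [("source", "yarn.lock")])
      (pvHeaderNames header).map (fun e => (pvClean e, vm.1, vm.2.items))

def parse_legacy_yarn_lock_py_alt (content : String) :
    List (String × Option String × (List (String × String))) :=
  let p := (PySem.Str.splitlines content).foldl pvBlocksStep ([], [])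
  (p.1 ++ (if p.2.isEmpty then [] else [p.2])).flatMap pvEmitBlockB

-- ===== PRECONDITION & SPEC =====

-- helpers for D_: blocks of consecutive non-blank lines, described via takeWhile/dropWhile
def pvGroupsAux (cur : List String) : List String → List (List String)
  | [] => if cur.isEmpty then [] else [cur.reverse]
  | l :: ls =>
    if pvBlank l then (if cur.isEmpty then [] else [cur.reverse]) ++ pvGroupsAux [] ls
    else pvGroupsAux (l :: cur) ls

def pvGroups (lines : List String) : List (List String) := pvGroupsAux [] lines

-- an indented line whose first word is "version"
def pvIsVer (l : String) : Bool := pvIndent l && (pvKV l).1 == "version"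

-- a block whose packages inherit a stale version: it has a header (non-indented line), some
-- "version" line, but no "version" line among its trailing indented lines (after the last header)
def pvBadBlock (b : List String) : Bool :=
  b.any (fun l => !pvIndent l) && b.any pvIsVer &&
    !((b.reverse.takeWhile (fun l => pvIndent l)).any pvIsVer)

-- On inputs where a block (run of non-blank lines) has an indented version line before its last
-- non-indented header and no version line after it, A reports the stale version left over from
-- before the header for the header's packages, while B reports none; resetting the version
-- together with the names and metadata when a new header starts is the intended behaviour.
def D_parse_legacy_yarn_lock_py (content : String) : Prop :=
  (pvGroups (PySem.Str.splitlines content)).any pvBadBlock = true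
instance (content : String) : Decidable (D_parse_legacy_yarn_lock_py content) := by
  unfold D_parse_legacy_yarn_lock_py; infer_instance

def Spec_parse_legacy_yarn_lock_py (content : String) (out : List (String × Option String × (List (String × String)))) : Prop := ¬ D_parse_legacy_yarn_lock_py content → out = parse_legacy_yarn_lock_py_alt content
instance (content : String) (out : List (String × Option String × (List (String × String)))) : Decidable (Spec_parse_legacy_yarn_lock_py content out) := by unfold Spec_parse_legacy_yarn_lock_py; infer_instance

def pvDiffWitness_parse_legacy_yarn_lock_py : String := "a:\n  version \"1.0\"\nb:"

def pvDiffWitnessOut_parse_legacy_yarn_lock_py :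
    (List (String × Option String × (List (String × String)))) ×
      (List (String × Option String × (List (String × String)))) :=
  ([("b", some "1.0", [("source", "yarn.lock")])],
   [("b", none, [("source", "yarn.lock")])])

-- ===== CLAIM (what is proved, stated in full; the proofs are below) =====
def Claim_unchanged_parse_legacy_yarn_lock_py : Prop := ∀ (content : String), Dom_parse_legacy_yarn_lock_py content → Spec_parse_legacy_yarn_lock_py content (parse_legacy_yarn_lock_py content)
def Claim_changed_parse_legacy_yarn_lock_py : Prop := Dom_parse_legacy_yarn_lock_py (pvDiffWitness_parse_legacy_yarn_lock_py) ∧ D_parse_legacy_yarn_lock_py (pvDiffWitness_parse_legacy_yarn_lock_py) ∧ parse_legacy_yarn_lock_py (pvDiffWitness_parse_legacy_yarn_lock_py) = pvDiffWitnessOut_parse_legacy_yarn_lock_py.1 ∧ parse_legacy_yarn_lock_py_alt (pvDiffWitness_parse_legacy_yarn_lock_py) = pvDiffWitnessOut_parse_legacy_yarn_lock_py.2 ∧ pvDiffWitnessOut_parse_legacy_yarn_lock_py.1 ≠ pvDiffWitnessOut_parse_legacy_yarn_lock_py.2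
def Claim_exact_parse_legacy_yarn_lock_py : Prop := ∀ (content : String), Dom_parse_legacy_yarn_lock_py content → D_parse_legacy_yarn_lock_py content → parse_legacy_yarn_lock_py content ≠ parse_legacy_yarn_lock_py_alt content

-- ===== LEMMAS AND PROOFS =====

-- proof-side decompositions of A's per-block behaviour
def pvVerStep (v : Option String) (line : String) : Option String :=
  if pvIndent line then (if (pvKV line).1 == "version" then some (pvKV line).2 else v) else v

def pvVersion (block : List String) : Option String := block.foldl pvVerStep none

def pvVer2Step (v : Option String) (line : String) : Option String :=
  if (pvKV line).1 == "version" then some (pvKV line).2 else v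

def pvMetaStep (d : PySem.Dict String String) (line : String) : PySem.Dict String String :=
  let kv := pvKV line
  if kv.1 == "resolved" || kv.1 == "integrity" then d.insert kv.1 kv.2 else d

def pvMeta (after : List String) : PySem.Dict String String :=
  after.foldl pvMetaStep (PySem.Dict.ofList [("source", "yarn.lock")])

-- what A emits for one block (whole-block version scan)
def pvEmitA (block : List String) : List (String × Option String × List (String × String)) :=
  match pvHarvest block with
  | (none, _) => []
  | (some header, after) =>
      (pvHeaderNames header).map (fun e => (pvClean e, pvVersion block, (pvMeta after).items))

-- harvest from an arbitrary start state, in terms of the base run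
theorem pvHarvest_from (block : List String) :
    ∀ st : Option String × List String,
      block.foldl pvHarvestStep st =
        ((block.foldl pvHarvestStep (none, [])).1.or st.1,
         if (block.foldl pvHarvestStep (none, [])).1.isSome then
           (block.foldl pvHarvestStep (none, [])).2
         else st.2 ++ (block.foldl pvHarvestStep (none, [])).2) := by
  induction block with
  | nil => intro st; simp
  | cons l ls ih =>
    intro st
    simp only [List.foldl_cons]
    by_cases hl : pvIndent l
    · rw [show pvHarvestStep st l = (st.1, st.2 ++ [l]) from by simp [pvHarvestStep, hl],
         show pvHarvestStep (none, ([] : List String)) l = (none, [l]) from by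
           simp [pvHarvestStep, hl]]
      rw [ih (st.1, st.2 ++ [l]), ih (none, [l])]
      cases hs : (ls.foldl pvHarvestStep (none, [])).1 <;> simp [hs]
    · rw [show pvHarvestStep st l = (some l, []) from by simp [pvHarvestStep, hl],
         show pvHarvestStep (none, ([] : List String)) l = (some l, []) from by
           simp [pvHarvestStep, hl]]
      rw [ih (some l, [])]
      cases hs : (ls.foldl pvHarvestStep (none, [])).1 <;> simp [hs]

-- the central characterisation: A's per-block loop state in terms of harvest/meta/version scans
theorem pvBlockChar (block : List String) :
    ∀ s : List String × PySem.Dict String String × Option String,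
      block.foldl pvAStepLine s =
        ((match (pvHarvest block).1 with | some h => pvHeaderNames h | none => s.1),
         (pvHarvest block).2.foldl pvMetaStep
           (if (pvHarvest block).1.isSome then PySem.Dict.ofList [("source", "yarn.lock")]
            else s.2.1),
         block.foldl pvVerStep s.2.2) := by
  induction block with
  | nil => intro s; simp [pvHarvest]
  | cons l ls ih =>
    intro s
    simp only [List.foldl_cons]
    by_cases hl : pvIndent l
    · -- indented line
      have hh : pvHarvest (l :: ls) =
          ((pvHarvest ls).1,
           if (pvHarvest ls).1.isSome then (pvHarvest ls).2 else l :: (pvHarvest ls).2) := by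
        unfold pvHarvest
        simp only [List.foldl_cons]
        rw [show pvHarvestStep (none, ([] : List String)) l = (none, [l]) from by
              simp [pvHarvestStep, hl]]
        rw [pvHarvest_from ls (none, [l])]
        cases hs : (ls.foldl pvHarvestStep (none, [])).1 <;> simp [hs]
      rw [hh,
          show pvVerStep s.2.2 l =
            (if (pvKV l).1 == "version" then some (pvKV l).2 else s.2.2) from by
              simp [pvVerStep, hl]]
      by_cases h1 : (pvKV l).1 == "version"
      · rw [show pvAStepLine s l = (s.1, s.2.1, some (pvKV l).2) from by
              simp [pvAStepLine, hl, h1],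
            ih (s.1, s.2.1, some (pvKV l).2)]
        cases hs : (pvHarvest ls).1
        · simp only [hs, Option.isSome_none, Bool.false_eq_true, if_false, List.foldl_cons]
          rw [show pvMetaStep s.2.1 l = s.2.1 from by
                simp [pvMetaStep, show (pvKV l).1 = "version" from by simpa using h1]]
          simp [h1]
        · simp [hs, h1]
      · by_cases h2 : (pvKV l).1 == "resolved"
        · have hk : (pvKV l).1 = "resolved" := by simpa using h2
          rw [show pvAStepLine s l = (s.1, s.2.1.insert "resolved" (pvKV l).2, s.2.2) from by
                simp [pvAStepLine, hl, h1, h2],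
              ih (s.1, s.2.1.insert "resolved" (pvKV l).2, s.2.2)]
          cases hs : (pvHarvest ls).1
          · simp only [hs, Option.isSome_none, Bool.false_eq_true, if_false, List.foldl_cons]
            rw [show pvMetaStep s.2.1 l = s.2.1.insert "resolved" (pvKV l).2 from by
                  simp [pvMetaStep, hk]]
            simp [h1]
          · simp [hs, h1]
        · by_cases h3 : (pvKV l).1 == "integrity"
          · have hk : (pvKV l).1 = "integrity" := by simpa using h3
            rw [show pvAStepLine s l = (s.1, s.2.1.insert "integrity" (pvKV l).2, s.2.2) from by
                  simp [pvAStepLine, hl, h1, h2, h3],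
                ih (s.1, s.2.1.insert "integrity" (pvKV l).2, s.2.2)]
            cases hs : (pvHarvest ls).1
            · simp only [hs, Option.isSome_none, Bool.false_eq_true, if_false, List.foldl_cons]
              rw [show pvMetaStep s.2.1 l = s.2.1.insert "integrity" (pvKV l).2 from by
                    simp [pvMetaStep, hk]]
              simp [h1]
            · simp [hs, h1]
          · rw [show pvAStepLine s l = s from by simp [pvAStepLine, hl, h1, h2, h3], ih s]
            cases hs : (pvHarvest ls).1
            · simp only [hs, Option.isSome_none, Bool.false_eq_true, if_false, List.foldl_cons]
              rw [show pvMetaStep s.2.1 l = s.2.1 from by simp [pvMetaStep, h2, h3]]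
              simp [h1]
            · simp [hs, h1]
    · -- header line
      have hh : pvHarvest (l :: ls) =
          ((pvHarvest ls).1.or (some l), (pvHarvest ls).2) := by
        unfold pvHarvest
        simp only [List.foldl_cons]
        rw [show pvHarvestStep (none, ([] : List String)) l = (some l, []) from by
              simp [pvHarvestStep, hl]]
        rw [pvHarvest_from ls (some l, [])]
        cases hs : (ls.foldl pvHarvestStep (none, [])).1 <;> simp [hs]
      rw [hh,
          show pvAStepLine s l =
            (pvHeaderNames l, PySem.Dict.ofList [("source", "yarn.lock")], s.2.2) from by
              simp [pvAStepLine, hl],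
          ih (pvHeaderNames l, PySem.Dict.ofList [("source", "yarn.lock")], s.2.2),
          show pvVerStep s.2.2 l = s.2.2 from by simp [pvVerStep, hl]]
      cases hs : (pvHarvest ls).1 <;> simp [hs]

-- inserting ("source","yarn.lock") into a dict that already maps "source" to "yarn.lock" is a no-op
theorem pvInsertSourceId (d : PySem.Dict String String)
    (h1 : d.get? "source" = some "yarn.lock") (h2 : d.keys.Nodup) :
    d.insert "source" "yarn.lock" = d := by
  apply PySem.Dict.ext
  rw [PySem.Dict.items_insert_of_contains d _ (by rw [PySem.Dict.contains_eq_isSome_get?, h1]; rfl)]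
  conv_rhs => rw [← List.map_id d.items]
  apply List.map_congr_left
  intro p hp
  by_cases hps : p.1 = "source"
  · have : d.get? p.1 = some p.2 := PySem.Dict.get?_of_mem_items d (by simpa using hp) h2
    rw [hps] at this
    rw [h1] at this
    have : p = ("source", "yarn.lock") := by
      cases p; simp_all
    simp [this]
  · simp [hps]

-- pvMeta keeps "source" ↦ "yarn.lock" in front and its keys unique
theorem pvMeta_inv (after : List String) :
    ∀ d : PySem.Dict String String, d.get? "source" = some "yarn.lock" → d.keys.Nodup →
      (after.foldl pvMetaStep d).get? "source" = some "yarn.lock" ∧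
        (after.foldl pvMetaStep d).keys.Nodup := by
  induction after with
  | nil => intro d h1 h2; exact ⟨h1, h2⟩
  | cons l ls ih =>
    intro d h1 h2
    rw [List.foldl_cons]
    by_cases hk : ((pvKV l).1 == "resolved" || (pvKV l).1 == "integrity") = true
    · rw [show pvMetaStep d l = d.insert (pvKV l).1 (pvKV l).2 from by simp [pvMetaStep, hk]]
      apply ih
      · rw [PySem.Dict.get?_insert_of_ne]
        · exact h1
        · rcases Bool.or_eq_true_iff.mp hk with h | h
          · rw [show (pvKV l).1 = "resolved" from by simpa using h]; decide
          · rw [show (pvKV l).1 = "integrity" from by simpa using h]; decide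
      · exact PySem.Dict.nodup_keys_insert _ _ _ h2
    · rw [show pvMetaStep d l = d from by simp [pvMetaStep, hk]]
      exact ih d h1 h2

theorem pvMetaInsertSource (after : List String) :
    (pvMeta after).insert "source" "yarn.lock" = pvMeta after := by
  have h := pvMeta_inv after (PySem.Dict.ofList [("source", "yarn.lock")]) (by decide) (by decide)
  exact pvInsertSourceId _ h.1 h.2

-- a flush of A's per-block state (mid-file form) is pvEmitA
theorem pvEmit_mid (cur : List String) :
    (cur.foldl pvAStepLine ([], PySem.Dict.empty, none)).1.map (fun e =>
        (pvClean e, (cur.foldl pvAStepLine ([], PySem.Dict.empty, none)).2.2,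
         (cur.foldl pvAStepLine ([], PySem.Dict.empty, none)).2.1.items)) =
      pvEmitA cur := by
  rw [pvBlockChar]
  unfold pvEmitA pvVersion pvMeta
  rcases hh : pvHarvest cur with ⟨h?, after⟩
  cases h? <;> simp

-- the final flush (which re-inserts "source") coincides as well
theorem pvEmit_fin (cur : List String) :
    (cur.foldl pvAStepLine ([], PySem.Dict.empty, none)).1.map (fun e =>
        (pvClean e, (cur.foldl pvAStepLine ([], PySem.Dict.empty, none)).2.2,
         (((cur.foldl pvAStepLine ([], PySem.Dict.empty, none)).2.1.insert "source" "yarn.lock").items))) =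
      pvEmitA cur := by
  rw [pvBlockChar]
  unfold pvEmitA pvVersion
  rcases hh : pvHarvest cur with ⟨h?, after⟩
  cases h?
  · simp
  · have hins := pvMetaInsertSource after
    unfold pvMeta at hins
    simp [hins, pvMeta]

-- phase 1 accumulates finished blocks by appending
theorem pvBlocks_from (lines : List String) :
    ∀ (bs : List (List String)) (cur : List String),
      lines.foldl pvBlocksStep (bs, cur) =
        (bs ++ (lines.foldl pvBlocksStep ([], cur)).1, (lines.foldl pvBlocksStep ([], cur)).2) := by
  induction lines with
  | nil => intro bs cur; simp
  | cons l ls ih =>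
    intro bs cur
    simp only [List.foldl_cons]
    by_cases hl : pvBlank l
    · by_cases hc : cur.isEmpty
      · rw [show pvBlocksStep (bs, cur) l = (bs, []) from by simp [pvBlocksStep, hl, hc],
            show pvBlocksStep (([] : List (List String)), cur) l = ([], []) from by
              simp [pvBlocksStep, hl, hc]]
        exact ih bs []
      · rw [show pvBlocksStep (bs, cur) l = (bs ++ [cur], []) from by simp [pvBlocksStep, hl, hc],
            show pvBlocksStep (([] : List (List String)), cur) l = ([cur], []) from by
              simp [pvBlocksStep, hl, hc]]
        rw [ih (bs ++ [cur]) [], ih [cur] []]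
        simp
    · rw [show pvBlocksStep (bs, cur) l = (bs, cur ++ [l]) from by simp [pvBlocksStep, hl],
          show pvBlocksStep (([] : List (List String)), cur) l = ([], cur ++ [l]) from by
            simp [pvBlocksStep, hl]]
      exact ih bs (cur ++ [l])

-- the main loop correspondence: A = flatMap pvEmitA over the fold-produced blocks
theorem pvMain (lines : List String) :
    ∀ (res : List (String × Option String × List (String × String))) (cur : List String),
      (let st := lines.foldl pvAStep (res, cur.foldl pvAStepLine ([], PySem.Dict.empty, none));
        st.1 ++ st.2.1.map (fun e =>
          (pvClean e, st.2.2.2, ((st.2.2.1.insert "source" "yarn.lock").items)))) =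
      res ++ ((let p := lines.foldl pvBlocksStep ([], cur);
        p.1 ++ (if p.2.isEmpty then [] else [p.2])).flatMap pvEmitA) := by
  induction lines with
  | nil =>
    intro res cur
    simp only [List.foldl_nil]
    rw [pvEmit_fin cur]
    by_cases hc : cur.isEmpty
    · have hcur : cur = [] := by simpa using hc
      subst hcur
      simp [pvEmitA, pvHarvest]
    · simp [hc]
  | cons l ls ih =>
    intro res cur
    simp only [List.foldl_cons]
    by_cases hl : pvBlank l
    · -- separator: A flushes, B closes the block
      rw [show pvBlocksStep (([] : List (List String)), cur) l =
            ((if cur.isEmpty then [] else [cur]), []) from by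
            by_cases hc : cur.isEmpty <;> simp [pvBlocksStep, hl, hc]]
      rw [show pvAStep (res, cur.foldl pvAStepLine ([], PySem.Dict.empty, none)) l =
            (res ++ (cur.foldl pvAStepLine ([], PySem.Dict.empty, none)).1.map (fun e =>
              (pvClean e, (cur.foldl pvAStepLine ([], PySem.Dict.empty, none)).2.2,
               (cur.foldl pvAStepLine ([], PySem.Dict.empty, none)).2.1.items)),
             [], PySem.Dict.empty, none) from by simp [pvAStep, hl]]
      rw [pvEmit_mid cur]
      have h2 := ih (res ++ pvEmitA cur) []
      simp only [List.foldl_nil] at h2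
      rw [h2]
      rw [pvBlocks_from ls (if cur.isEmpty then [] else [cur]) []]
      by_cases hc : cur.isEmpty
      · have hcur : cur = [] := by simpa using hc
        subst hcur
        simp [pvEmitA, pvHarvest]
      · simp [hc, List.flatMap_append]
    · -- in-block line
      rw [show pvBlocksStep (([] : List (List String)), cur) l = ([], cur ++ [l]) from by
            simp [pvBlocksStep, hl]]
      rw [show pvAStep (res, cur.foldl pvAStepLine ([], PySem.Dict.empty, none)) l =
            (res, pvAStepLine (cur.foldl pvAStepLine ([], PySem.Dict.empty, none)) l) from by
            simp [pvAStep, hl]]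
      have h2 := ih res (cur ++ [l])
      rw [List.foldl_append] at h2
      simpa using h2

-- the fold-produced blocks are pvGroups
theorem pvGroupsAux_eq_fold (lines : List String) :
    ∀ cur : List String,
      (let st := lines.foldl pvBlocksStep ([], cur); st.1 ++ (if st.2.isEmpty then [] else [st.2])) =
        pvGroupsAux cur.reverse lines := by
  induction lines with
  | nil =>
    intro cur
    simp only [List.foldl_nil, pvGroupsAux, List.isEmpty_reverse, List.reverse_reverse]
    cases cur <;> simp
  | cons l ls ih =>
    intro cur
    simp only [List.foldl_cons]
    by_cases hl : pvBlank l
    · rw [show pvBlocksStep (([] : List (List String)), cur) l =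
            ((if cur.isEmpty then [] else [cur]), []) from by
            by_cases hc : cur.isEmpty <;> simp [pvBlocksStep, hl, hc]]
      rw [pvBlocks_from ls (if cur.isEmpty then [] else [cur]) []]
      have h0 := ih []
      simp only [List.reverse_nil] at h0
      simp only [pvGroupsAux, hl, if_true, List.isEmpty_reverse, List.reverse_reverse]
      rw [← h0]
      by_cases hc : cur.isEmpty <;> simp [hc]
    · rw [show pvBlocksStep (([] : List (List String)), cur) l = ([], cur ++ [l]) from by
            simp [pvBlocksStep, hl]]
      have h1 := ih (cur ++ [l])
      simp only [List.reverse_append, List.reverse_cons, List.reverse_nil,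
        List.nil_append, List.singleton_append] at h1
      simp only [pvGroupsAux, hl, if_false, Bool.false_eq_true]
      exact h1

theorem pvGroups_eq_fold (lines : List String) :
    (let st := lines.foldl pvBlocksStep ([], []);
      st.1 ++ (if st.2.isEmpty then [] else [st.2])) = pvGroups lines := by
  have := pvGroupsAux_eq_fold lines []
  simpa [pvGroups] using this

-- harvest structure lemmas
theorem pvHarvest_cons_indent (l : String) (ls : List String) (hl : pvIndent l = true) :
    pvHarvest (l :: ls) =
      ((pvHarvest ls).1,
       if (pvHarvest ls).1.isSome then (pvHarvest ls).2 else l :: (pvHarvest ls).2) := by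
  unfold pvHarvest
  simp only [List.foldl_cons]
  rw [show pvHarvestStep (none, ([] : List String)) l = (none, [l]) from by
        simp [pvHarvestStep, hl]]
  rw [pvHarvest_from ls (none, [l])]
  cases hs : (ls.foldl pvHarvestStep (none, [])).1 <;> simp [hs]

theorem pvHarvest_cons_header (l : String) (ls : List String) (hl : pvIndent l = false) :
    pvHarvest (l :: ls) = ((pvHarvest ls).1.or (some l), (pvHarvest ls).2) := by
  unfold pvHarvest
  simp only [List.foldl_cons]
  rw [show pvHarvestStep (none, ([] : List String)) l = (some l, []) from by
        simp [pvHarvestStep, hl]]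
  rw [pvHarvest_from ls (some l, [])]
  cases hs : (ls.foldl pvHarvestStep (none, [])).1 <;> simp [hs]

theorem pvHarvest_none_eq (b : List String) :
    (pvHarvest b).1 = none → (pvHarvest b).2 = b ∧ ∀ x ∈ b, pvIndent x = true := by
  induction b with
  | nil => intro _; simp [pvHarvest]
  | cons l ls ih =>
    intro h
    by_cases hl : pvIndent l
    · rw [pvHarvest_cons_indent l ls hl] at h ⊢
      simp only at h
      have hih := ih h
      rw [h] at *
      constructor
      · simp [hih.1]
      · intro x hx
        rcases List.mem_cons.mp hx with h1 | h1
        · subst h1; exact hl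
        · exact hih.2 x h1
    · rw [pvHarvest_cons_header l ls (by simpa using hl)] at h
      simp only at h
      cases hs : (pvHarvest ls).1 <;> rw [hs] at h <;> simp at h

theorem pvHarvest_some_eq (b : List String) :
    ∀ h, (pvHarvest b).1 = some h →
      ∃ pre, b = pre ++ h :: (pvHarvest b).2 ∧ pvIndent h = false ∧
        ∀ x ∈ (pvHarvest b).2, pvIndent x = true := by
  induction b with
  | nil => intro h hh; simp [pvHarvest] at hh
  | cons l ls ih =>
    intro h hh
    by_cases hl : pvIndent l
    · rw [pvHarvest_cons_indent l ls hl] at hh ⊢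
      simp only at hh ⊢
      obtain ⟨pre, hb, hih, hia⟩ := ih h hh
      rw [hh] at *
      simp only [Option.isSome_some, if_true]
      exact ⟨l :: pre, by simp only [List.cons_append]; exact congrArg (List.cons l) hb, hih, hia⟩
    · rw [pvHarvest_cons_header l ls (by simpa using hl)] at hh ⊢
      simp only at hh ⊢
      cases hs : (pvHarvest ls).1
      · rw [hs] at hh
        have hlh : l = h := by simpa using hh
        subst hlh
        have hnone := pvHarvest_none_eq ls hs
        refine ⟨[], ?_, by simpa using hl, ?_⟩
        · simp [hnone.1]
        · intro x hx
          exact hnone.2 x (by simpa [hnone.1] using hx)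
      · rw [hs] at hh
        have hlh : (pvHarvest ls).1 = some h := by rw [hs]; simpa using hh
        obtain ⟨pre, hb, hih, hia⟩ := ih h hlh
        exact ⟨l :: pre, by simp only [List.cons_append]; exact congrArg (List.cons l) hb, hih, hia⟩

-- takeWhile over an all-true prefix followed by a false element
theorem pvTakeWhile_prefix {α : Type} (p : α → Bool) (l1 : List α) (a : α) (l2 : List α)
    (h1 : ∀ x ∈ l1, p x = true) (h2 : p a = false) :
    (l1 ++ a :: l2).takeWhile p = l1 := by
  induction l1 with
  | nil => simp [List.takeWhile_cons, h2]
  | cons x xs ih =>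
    simp only [List.cons_append, List.takeWhile_cons, h1 x (by simp)]
    simp [ih (fun y hy => h1 y (by simp [hy]))]

-- version-scan lemmas
theorem pvVer_const (l : List String) (v : Option String)
    (h : ∀ x ∈ l, pvIsVer x = false) : l.foldl pvVerStep v = v := by
  induction l generalizing v with
  | nil => simp
  | cons x xs ih =>
    have hx := h x (by simp)
    have hstep : pvVerStep v x = v := by
      unfold pvIsVer at hx
      unfold pvVerStep
      by_cases hi : pvIndent x
      · simp [hi] at hx ⊢; simp [hx]
      · simp [hi]
    rw [List.foldl_cons, hstep]
    exact ih v (fun y hy => h y (List.mem_cons_of_mem _ hy))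

theorem pvVer_any (l : List String) (h : l.any pvIsVer = true) :
    ∀ v, l.foldl pvVerStep v = l.foldl pvVerStep none := by
  induction l with
  | nil => simp at h
  | cons x xs ih =>
    intro v
    by_cases hxs : xs.any pvIsVer
    · simp only [List.foldl_cons]
      rw [ih hxs (pvVerStep v x), ih hxs (pvVerStep none x)]
    · have hx : pvIsVer x = true := by
        simp only [List.any_cons, Bool.or_eq_true] at h
        tauto
      unfold pvIsVer at hx
      simp only [Bool.and_eq_true, beq_iff_eq] at hx
      simp [List.foldl_cons, pvVerStep, hx.1, hx.2]

theorem pvVer_indent (l : List String) (h : ∀ x ∈ l, pvIndent x = true) :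
    ∀ v, l.foldl pvVerStep v = l.foldl pvVer2Step v := by
  induction l with
  | nil => intro v; simp
  | cons x xs ih =>
    intro v
    simp only [List.foldl_cons]
    rw [show pvVerStep v x = pvVer2Step v x from by
          simp [pvVerStep, pvVer2Step, h x (by simp)]]
    exact ih (fun y hy => h y (by simp [hy])) _

theorem pvVer2_const (l : List String) (v : Option String)
    (h : ∀ x ∈ l, ((pvKV x).1 == "version") = false) : l.foldl pvVer2Step v = v := by
  induction l generalizing v with
  | nil => simp
  | cons x xs ih =>
    rw [List.foldl_cons, show pvVer2Step v x = v from by simp [pvVer2Step, h x (by simp)]]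
    exact ih v (fun y hy => h y (List.mem_cons_of_mem _ hy))

-- B's after-loop splits into the version scan and the meta scan
theorem pvBAfter_split (l : List String) :
    ∀ (v : Option String) (d : PySem.Dict String String),
      l.foldl pvBAfterStep (v, d) = (l.foldl pvVer2Step v, l.foldl pvMetaStep d) := by
  induction l with
  | nil => intro v d; simp
  | cons x xs ih =>
    intro v d
    simp only [List.foldl_cons]
    rw [show pvBAfterStep (v, d) x = (pvVer2Step v x, pvMetaStep d x) from by
          unfold pvBAfterStep pvVer2Step pvMetaStep
          by_cases h1 : (pvKV x).1 == "version"
          · have : (pvKV x).1 = "version" := by simpa using h1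
            simp [this]
          · by_cases h2 : ((pvKV x).1 == "resolved" || (pvKV x).1 == "integrity") = true
            · simp [h1, h2]
            · simp [h1, h2]]
    exact ih _ _

-- on a good block, A's emission is B's emission
theorem pvEmit_good (b : List String) (hgood : pvBadBlock b = false) :
    pvEmitA b = pvEmitBlockB b := by
  unfold pvEmitA pvEmitBlockB
  rcases hhv : pvHarvest b with ⟨ho, after⟩
  cases ho with
  | none => simp
  | some h =>
    obtain ⟨pre, hb, hih, hia⟩ := pvHarvest_some_eq b h (by rw [hhv])
    rw [hhv] at hb hia
    simp only at hb hia ⊢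
    rw [pvBAfter_split]
    -- reduce to the version components
    have hAfterRev : b.reverse.takeWhile (fun l => pvIndent l) = after.reverse := by
      rw [hb]
      simp only [List.reverse_append, List.reverse_cons]
      rw [List.append_assoc]
      exact pvTakeWhile_prefix _ after.reverse h pre.reverse
        (fun x hx => hia x (by simpa using hx)) hih
    have hHdr : b.any (fun l => !pvIndent l) = true := by
      rw [hb]; refine List.any_eq_true.mpr ⟨h, by simp, by simp [hih]⟩
    have hver : pvVersion b = after.foldl pvVer2Step none := by
      by_cases hA : after.any pvIsVer = true
      · unfold pvVersion
        rw [hb, List.foldl_append, List.foldl_cons]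
        rw [pvVer_any after hA _]
        exact pvVer_indent after hia none
      · -- then no version line anywhere in b (else the block would be bad)
        have hnb : b.any pvIsVer = false := by
          by_contra hc
          have hbv : b.any pvIsVer = true := by
            cases hx : b.any pvIsVer
            · exact absurd hx hc
            · rfl
          have : pvBadBlock b = true := by
            unfold pvBadBlock
            rw [hHdr, hbv, hAfterRev]
            simp only [List.any_reverse]
            cases hx : after.any pvIsVer
            · simp
            · exact absurd hx (by simp [hA])
          rw [this] at hgood; exact absurd hgood (by simp)
        have hall : ∀ x ∈ b, pvIsVer x = false := by
          intro x hx
          cases hv : pvIsVer x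
          · rfl
          · exact absurd (List.any_eq_true.mpr ⟨x, hx, hv⟩) (by simp [hnb])
        unfold pvVersion
        rw [pvVer_const b none hall]
        rw [pvVer2_const after none ?_]
        intro x hx
        have h1 := hall x (by rw [hb]; simp [hx])
        have h2 := hia x hx
        unfold pvIsVer at h1
        rw [h2] at h1
        simpa using h1
    rw [hver]
    simp [pvMeta]

-- flatMap congruence
theorem pvFlatMap_congr {α β : Type} (l : List α) (f g : α → List β)
    (h : ∀ x ∈ l, f x = g x) : l.flatMap f = l.flatMap g := by
  induction l with
  | nil => rfl
  | cons x xs ih =>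
    simp only [List.flatMap_cons]
    rw [h x (by simp), ih (fun y hy => h y (by simp [hy]))]

-- splitOn never returns the empty list, so a header always yields at least one name
theorem pvSplitGo_ne_nil (sep : List Char) : ∀ (fuel : Nat) (l cur : List Char) (acc : List (List Char)),
    PySem.Chars.splitOn.go sep fuel l cur acc ≠ [] := by
  intro fuel
  induction fuel with
  | zero => intro l cur acc; simp [PySem.Chars.splitOn.go]
  | succ n ih =>
    intro l cur acc
    cases l with
    | nil => simp [PySem.Chars.splitOn.go]
    | cons c rest =>
      rw [show PySem.Chars.splitOn.go sep (n+1) (c :: rest) cur acc =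
            (if sep.isPrefixOf (c :: rest) then
               PySem.Chars.splitOn.go sep n (List.drop sep.length (c :: rest)) [] (cur.reverse :: acc)
             else PySem.Chars.splitOn.go sep n rest (c :: cur) acc) from rfl]
      split_ifs
      · exact ih _ _ _
      · exact ih _ _ _

theorem pvHeaderNames_ne_nil (l : String) : pvHeaderNames l ≠ [] := by
  unfold pvHeaderNames PySem.Str.split? PySem.Chars.split?
  rw [show ",".toList = [','] from rfl]
  simp only [show ([','].isEmpty) = false from rfl, Bool.false_eq_true, if_false,
    Option.map_some, Option.getD_some, ne_eq, List.map_eq_nil_iff]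
  rw [PySem.Chars.splitOn]
  exact pvSplitGo_ne_nil _ _ _ _ _

theorem pvVer_isSome_mono (l : List String) : ∀ v : Option String, v.isSome → (l.foldl pvVerStep v).isSome := by
  induction l with
  | nil => intro v h; simpa using h
  | cons x xs ih =>
    intro v h
    rw [List.foldl_cons]
    apply ih
    unfold pvVerStep
    split_ifs
    · simp
    · exact h
    · exact h

theorem pvVer_any_isSome (l : List String) (h : l.any pvIsVer = true) :
    (l.foldl pvVerStep none).isSome := by
  induction l with
  | nil => simp at h
  | cons x xs ih =>
    rw [List.foldl_cons]
    by_cases hx : pvIsVer x = true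
    · apply pvVer_isSome_mono
      unfold pvIsVer at hx
      simp only [Bool.and_eq_true, beq_iff_eq] at hx
      simp [pvVerStep, hx.1, hx.2]
    · have hxs : xs.any pvIsVer = true := by
        simp only [List.any_cons, Bool.or_eq_true] at h
        tauto
      have hstep : pvVerStep none x = none := by
        unfold pvIsVer at hx
        unfold pvVerStep
        by_cases hi : pvIndent x
        · simp [hi] at hx ⊢; simp [hx]
        · simp [hi]
      rw [hstep]; exact ih hxs

theorem pvEmit_len (b : List String) : (pvEmitA b).length = (pvEmitBlockB b).length := by
  unfold pvEmitA pvEmitBlockB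
  rcases pvHarvest b with ⟨ho, after⟩
  cases ho <;> simp

-- on a bad block, A's emission and B's emission really differ (some version vs none)
theorem pvEmit_bad (b : List String) (hbad : pvBadBlock b = true) :
    pvEmitA b ≠ pvEmitBlockB b := by
  unfold pvBadBlock at hbad
  simp only [Bool.and_eq_true, Bool.not_eq_true'] at hbad
  obtain ⟨⟨hHdr, hVer⟩, hAfterNo⟩ := hbad
  unfold pvEmitA pvEmitBlockB
  rcases hhv : pvHarvest b with ⟨ho, after⟩
  cases ho with
  | none =>
    have hnone := pvHarvest_none_eq b (by rw [hhv])
    obtain ⟨x, hxmem, hxi⟩ := List.any_eq_true.mp hHdr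
    have := hnone.2 x hxmem
    simp_all
  | some h =>
    obtain ⟨pre, hb, hih, hia⟩ := pvHarvest_some_eq b h (by rw [hhv])
    rw [hhv] at hb hia
    simp only at hb hia
    have hAfterRev : b.reverse.takeWhile (fun l => pvIndent l) = after.reverse := by
      rw [hb]
      simp only [List.reverse_append, List.reverse_cons]
      rw [List.append_assoc]
      exact pvTakeWhile_prefix _ after.reverse h pre.reverse
        (fun x hx => hia x (by simpa using hx)) hih
    have hAfterAny : after.any pvIsVer = false := by
      rw [hAfterRev] at hAfterNo
      simpa using hAfterNo
    have hVA : (pvVersion b).isSome := pvVer_any_isSome b hVer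
    have hVB : after.foldl pvVer2Step none = none := by
      apply pvVer2_const
      intro x hx
      have h2 := hia x hx
      have h3 : pvIsVer x = false := by
        cases hxx : pvIsVer x
        · rfl
        · exact absurd (List.any_eq_true.mpr ⟨x, hx, hxx⟩) (by simp [hAfterAny])
      unfold pvIsVer at h3
      rw [h2] at h3
      simpa using h3
    intro heq
    simp only [pvBAfter_split, hVB] at heq
    cases hn : pvHeaderNames h with
    | nil => exact pvHeaderNames_ne_nil h hn
    | cons n ns =>
      rw [hn] at heq
      simp only [List.map_cons, List.cons.injEq, Prod.mk.injEq] at heq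
      have hv2 : pvVersion b = none := heq.1.2.1
      rw [hv2] at hVA
      simp at hVA

theorem pvFlatMap_ne (gs : List (List String)) (h : gs.any pvBadBlock = true) :
    List.flatMap pvEmitA gs ≠ List.flatMap pvEmitBlockB gs := by
  induction gs with
  | nil => simp at h
  | cons b rest ih =>
    simp only [List.flatMap_cons]
    cases hbad : pvBadBlock b
    · have hrest : rest.any pvBadBlock = true := by
        simp only [List.any_cons, Bool.or_eq_true] at h
        rcases h with h | h
        · rw [hbad] at h; exact absurd h (by simp)
        · exact h
      rw [pvEmit_good b hbad]
      intro heq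
      exact ih hrest (List.append_cancel_left heq)
    · intro heq
      exact pvEmit_bad b hbad (List.append_inj heq (pvEmit_len b)).1

-- ===== VERDICT (by name: the statement is the Claim_ definition above) =====
theorem parse_legacy_yarn_lock_py_spec : Claim_unchanged_parse_legacy_yarn_lock_py := by
  intro content _ hnd
  have hmain := pvMain (PySem.Str.splitlines content) [] []
  simp only [List.foldl_nil, List.nil_append] at hmain
  have hgrp := pvGroups_eq_fold (PySem.Str.splitlines content)
  simp only at hgrp
  have hcong : List.flatMap pvEmitA (pvGroups (PySem.Str.splitlines content)) =
      List.flatMap pvEmitBlockB (pvGroups (PySem.Str.splitlines content)) := by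
    apply pvFlatMap_congr
    intro b hbmem
    apply pvEmit_good
    unfold D_parse_legacy_yarn_lock_py at hnd
    cases hbad : pvBadBlock b
    · rfl
    · exact absurd (List.any_eq_true.mpr ⟨b, hbmem, hbad⟩) hnd
  exact hmain.trans ((congrArg (fun l => l.flatMap pvEmitA) hgrp).trans
    (hcong.trans (congrArg (fun l => l.flatMap pvEmitBlockB) hgrp.symm)))

theorem parse_legacy_yarn_lock_py_changed : Claim_changed_parse_legacy_yarn_lock_py := by
  unfold Claim_changed_parse_legacy_yarn_lock_py
  refine ⟨by decide, by decide, by decide, by decide, by decide⟩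

theorem parse_legacy_yarn_lock_py_tight : Claim_exact_parse_legacy_yarn_lock_py := by
  intro content _ hd
  unfold D_parse_legacy_yarn_lock_py at hd
  have hmain := pvMain (PySem.Str.splitlines content) [] []
  simp only [List.foldl_nil, List.nil_append] at hmain
  have hgrp := pvGroups_eq_fold (PySem.Str.splitlines content)
  simp only at hgrp
  have hA : parse_legacy_yarn_lock_py content =
      List.flatMap pvEmitA (pvGroups (PySem.Str.splitlines content)) :=
    hmain.trans (congrArg (fun l => l.flatMap pvEmitA) hgrp)
  have hB : parse_legacy_yarn_lock_py_alt content =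
      List.flatMap pvEmitBlockB (pvGroups (PySem.Str.splitlines content)) :=
    congrArg (fun l => l.flatMap pvEmitBlockB) hgrp
  rw [hA, hB]
  exact pvFlatMap_ne _ hd
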